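-- pv_equiv track=rewrite | github.com/RemigiuszWoj/PhD | src/neighborhoods/common.py | compute_tail
-- ===== SOURCE A (Python) =====
-- from typing import Dict, List, Tuple
--
-- def compute_tail(
--     pi: List[int],
--     processing_times: List[List[int]],
-- ) -> List[List[int]]:
--     """Compute Tail matrix (backward remaining times).
--
--     Tail[i][j] = time needed from position j on machine i to complete all remaining work.
--     Computed backwards from the end.
--
--     Complexity: O(m·n)
--
--     Args:
--         pi: Current permutation
--         processing_times: m × n processing times matrix
--
--     Returns:
--         Tail matrix of size m × n
--     """
--     m = len(processing_times)
--     n = len(pi)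
--
--     Tail = [[0] * n for _ in range(m)]
--
--     # Last position, last machine
--     Tail[m - 1][n - 1] = processing_times[m - 1][pi[n - 1]]
--
--     # Last position, remaining machines (bottom to top)
--     for i in range(m - 2, -1, -1):
--         Tail[i][n - 1] = Tail[i + 1][n - 1] + processing_times[i][pi[n - 1]]
--
--     # Last machine, remaining positions (right to left)
--     for j in range(n - 2, -1, -1):
--         Tail[m - 1][j] = Tail[m - 1][j + 1] + processing_times[m - 1][pi[j]]
--
--     # Remaining positions (right to left, bottom to top)
--     for j in range(n - 2, -1, -1):
--         for i in range(m - 2, -1, -1):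
--             Tail[i][j] = max(Tail[i + 1][j], Tail[i][j + 1]) + processing_times[i][pi[j]]
--
--     return Tail
-- ===== SOURCE B (Python) =====
-- from typing import List
--
--
-- def compute_tail(
--     pi: List[int],
--     processing_times: List[List[int]],
-- ) -> List[List[int]]:
--     """Top-down memoized recursion: Tail[i][j] is defined recursively as the
--     larger of the subproblem below and the subproblem to the right (0 when
--     neither exists) plus the local processing time; a memo dict caches each
--     cell so every subproblem is solved once."""
--     m = len(processing_times)
--     n = len(pi)
--     memo = {}
--
--     def t(i: int, j: int) -> int:
--         if (i, j) in memo: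
--             return memo[(i, j)]
--         if i + 1 < m:
--             best = t(i + 1, j)
--             if j + 1 < n:
--                 best = max(best, t(i, j + 1))
--         elif j + 1 < n:
--             best = t(i, j + 1)
--         else:
--             best = 0
--         val = best + processing_times[i][pi[j]]
--         memo[(i, j)] = val
--         return val
--
--     return [[t(i, j) for j in range(n)] for i in range(m)]
-- ===== Notes on version B (the rewrite author's own statement) =====
-- stated objective: alternative
-- what changed: Replaces A's iterative four-phase in-place matrix fill (corner, last column, last row, interior loops) with a top-down recursive definition of each cell memoized in a dict: a recursive function t(i,j) computes a cell from its existing neighbours on demand and the result matrix is assembled by querying t.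
import Mathlib
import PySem

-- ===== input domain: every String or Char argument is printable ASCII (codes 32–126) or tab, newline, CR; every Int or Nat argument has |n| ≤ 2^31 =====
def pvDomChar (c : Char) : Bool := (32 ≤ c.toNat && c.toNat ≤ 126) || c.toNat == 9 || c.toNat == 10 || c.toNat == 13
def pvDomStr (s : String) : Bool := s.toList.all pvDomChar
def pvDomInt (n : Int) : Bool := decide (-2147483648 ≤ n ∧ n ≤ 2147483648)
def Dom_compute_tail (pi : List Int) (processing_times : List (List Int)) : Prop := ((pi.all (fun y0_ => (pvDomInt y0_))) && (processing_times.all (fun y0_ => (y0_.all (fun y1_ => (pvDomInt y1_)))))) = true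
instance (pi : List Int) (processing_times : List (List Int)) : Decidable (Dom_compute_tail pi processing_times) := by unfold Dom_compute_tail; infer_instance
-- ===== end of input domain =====

-- B replaces A's four-phase iterative in-place matrix fill with a top-down memoized recursion (alternative decomposition, same O(m·n) cost); return-value equivalence on Pre_.

-- ===== PORT A =====
-- Tail[i][j] read / write (Python's t[i][j] and t[i][j] = v)
def getT (t : List (List Int)) (i j : Int) : Int :=
  PySem.List.pyGetD (PySem.List.pyGetD t i []) j 0

def setT (t : List (List Int)) (i j : Int) (v : Int) : List (List Int) :=
  PySem.List.pySetD t i (PySem.List.pySetD (PySem.List.pyGetD t i []) j v)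

def compute_tail (pi : List Int) (processing_times : List (List Int)) : List (List Int) :=
  let m : Int := PySem.List.len processing_times
  let n : Int := PySem.List.len pi
  -- Tail = [[0] * n for _ in range(m)]
  let tail0 : List (List Int) :=
    (PySem.List.pyRange 0 m 1).map (fun _ => List.replicate n.toNat (0 : Int))
  -- Tail[m-1][n-1] = processing_times[m-1][pi[n-1]]
  let t1 := setT tail0 (m - 1) (n - 1)
      (PySem.List.pyGetD (PySem.List.pyGetD processing_times (m - 1) [])
        (PySem.List.pyGetD pi (n - 1) 0) 0)
  -- last position, remaining machines
  let t2 := (PySem.List.pyRange (m - 2) (-1) (-1)).foldl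
      (fun t i =>
        setT t i (n - 1)
          (getT t (i + 1) (n - 1) +
            PySem.List.pyGetD (PySem.List.pyGetD processing_times i [])
              (PySem.List.pyGetD pi (n - 1) 0) 0)) t1
  -- last machine, remaining positions
  let t3 := (PySem.List.pyRange (n - 2) (-1) (-1)).foldl
      (fun t j =>
        setT t (m - 1) j
          (getT t (m - 1) (j + 1) +
            PySem.List.pyGetD (PySem.List.pyGetD processing_times (m - 1) [])
              (PySem.List.pyGetD pi j 0) 0)) t2
  -- remaining positions, remaining machines
  let t4 := (PySem.List.pyRange (n - 2) (-1) (-1)).foldl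
      (fun t j =>
        (PySem.List.pyRange (m - 2) (-1) (-1)).foldl
          (fun t i =>
            setT t i j
              (max (getT t (i + 1) j) (getT t i (j + 1)) +
                PySem.List.pyGetD (PySem.List.pyGetD processing_times i [])
                  (PySem.List.pyGetD pi j 0) 0)) t) t3
  t4

-- ===== PORT B =====
-- the inner recursive function t(i, j) of Source B, with the memo dict threaded through
def tailGo (pi : List Int) (pts : List (List Int)) (m n : ℕ) (i j : ℕ)
    (memo : PySem.Dict (Int × Int) Int) : Int × PySem.Dict (Int × Int) Int :=
  match memo.get? (((i : Int), (j : Int))) with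
  | some v => (v, memo)
  | none =>
    -- if i+1 < m: best = t(i+1, j); if j+1 < n: best = max(best, t(i, j+1))
    -- elif j+1 < n: best = t(i, j+1)  else: best = 0
    let p :=
      if _h : i + 1 < m then
        let pb := tailGo pi pts m n (i + 1) j memo
        if _h2 : j + 1 < n then
          let pr := tailGo pi pts m n i (j + 1) pb.2
          (max pb.1 pr.1, pr.2)
        else pb
      else if _h : j + 1 < n then tailGo pi pts m n i (j + 1) memo
      else ((0 : Int), memo)
    -- val = best + processing_times[i][pi[j]]; memo[(i, j)] = val
    let val := p.1 + PySem.List.pyGetD (PySem.List.pyGetD pts (i : Int) [])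
        (PySem.List.pyGetD pi (j : Int) 0) 0
    (val, p.2.insert ((i : Int), (j : Int)) val)
termination_by (m - i) + (n - j)
decreasing_by all_goals omega

def compute_tail_alt (pi : List Int) (processing_times : List (List Int)) : List (List Int) :=
  let m := processing_times.length
  let n := pi.length
  -- [[t(i, j) for j in range(n)] for i in range(m)] with the shared memo threaded left to right
  ((List.range m).foldl
    (fun (acc : List (List Int) × PySem.Dict (Int × Int) Int) i =>
      let r := (List.range n).foldl
        (fun (acc2 : List Int × PySem.Dict (Int × Int) Int) j =>
          let p := tailGo pi processing_times m n i j acc2.2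
          (acc2.1 ++ [p.1], p.2))
        (([] : List Int), acc.2)
      (acc.1 ++ [r.1], r.2))
    (([] : List (List Int)), PySem.Dict.empty)).1

-- ===== PRECONDITION & SPEC =====
-- Pre_ excludes exactly the inputs where A raises IndexError: empty pi or empty
-- processing_times (Tail[-1] on an empty list), and any pi entry out of range
-- as an index into some processing-times row.
def Pre_compute_tail (pi : List Int) (processing_times : List (List Int)) : Prop :=
  pi ≠ [] ∧ processing_times ≠ [] ∧
    ∀ r ∈ processing_times, ∀ x ∈ pi, PySem.Raise.InRange r.length x

instance (pi : List Int) (processing_times : List (List Int)) : Decidable (Pre_compute_tail pi processing_times) := by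
  unfold Pre_compute_tail; infer_instance

def pvWitness_compute_tail : List Int × List (List Int) := ([0, 1], [[3, 1], [2, 4]])

def Spec_compute_tail (pi : List Int) (processing_times : List (List Int)) (out : List (List Int)) : Prop := out = compute_tail_alt pi processing_times
instance (pi : List Int) (processing_times : List (List Int)) (out : List (List Int)) : Decidable (Spec_compute_tail pi processing_times out) := by unfold Spec_compute_tail; infer_instance

-- ===== CLAIM (what is proved, stated in full; the proofs are below) =====
def Claim_equal_compute_tail : Prop := ∀ (pi : List Int) (processing_times : List (List Int)), Dom_compute_tail pi processing_times → Pre_compute_tail pi processing_times → Spec_compute_tail pi processing_times (compute_tail pi processing_times)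

-- ===== LEMMAS AND PROOFS =====

def pAt (pts : List (List Int)) (pi : List Int) (i j : ℕ) : Int :=
  PySem.List.pyGetD (pts.getD i []) (pi.getD j 0) 0

def M (m n : ℕ) (g : ℕ → ℕ → Int) : List (List Int) :=
  (List.range m).map (fun i => (List.range n).map (g i))

theorem M_congr {m n : ℕ} {g g' : ℕ → ℕ → Int}
    (h : ∀ i < m, ∀ j < n, g i j = g' i j) : M m n g = M m n g' := by
  unfold M
  refine List.map_congr_left (fun i hi => ?_)
  exact List.map_congr_left (fun j hj => h i (List.mem_range.mp hi) j (List.mem_range.mp hj))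

theorem getT_M {m n : ℕ} (g : ℕ → ℕ → Int) (i j : ℕ) (hi : i < m) (hj : j < n) :
    getT (M m n g) (i : Int) (j : Int) = g i j := by
  simp [getT, M, List.getD_eq_getElem?_getD, hi, hj]

theorem setT_M {m n : ℕ} (g : ℕ → ℕ → Int) (i j : ℕ) (v : Int) (hi : i < m) (_hj : j < n) :
    setT (M m n g) (i : Int) (j : Int) v
      = M m n (fun i' j' => if i' = i ∧ j' = j then v else g i' j') := by
  simp only [setT, M, PySem.List.pySetD_natCast, PySem.List.pyGetD_natCast]
  apply List.ext_getElem
  · simp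
  · intro k h1 h2
    simp only [List.getElem_set, List.getElem_map, List.getElem_range,
      List.getD_eq_getElem?_getD, List.getElem?_map, List.getElem?_range, hi] at *
    by_cases hk : i = k
    · subst hk
      simp
      apply List.ext_getElem
      · simp
      · intro l h3 h4
        simp only [List.getElem_set, List.getElem_map, List.getElem_range]
        by_cases hl : j = l
        · subst hl; simp
        · simp [hl, Ne.symm hl]
    · simp [hk, Ne.symm hk]

def tSpec (pts : List (List Int)) (pi : List Int) (m n i j : ℕ) : Int :=
  (if i + 1 < m then
     (if j + 1 < n then max (tSpec pts pi m n (i + 1) j) (tSpec pts pi m n i (j + 1))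
      else tSpec pts pi m n (i + 1) j)
   else
     (if j + 1 < n then tSpec pts pi m n i (j + 1) else 0)) + pAt pts pi i j
termination_by (m - i) + (n - j)
decreasing_by all_goals omega

def tS (pts : List (List Int)) (pi : List Int) (i j : ℕ) : Int :=
  tSpec pts pi pts.length pi.length i j

theorem tS_unfold (pts : List (List Int)) (pi : List Int) (i j : ℕ) :
    tS pts pi i j = (if i + 1 < pts.length then
        (if j + 1 < pi.length then max (tS pts pi (i+1) j) (tS pts pi i (j+1))
         else tS pts pi (i+1) j)
      else (if j + 1 < pi.length then tS pts pi i (j+1) else 0)) + pAt pts pi i j := by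
  rw [tS, tSpec]; rfl

-- ----- B side: the memoized recursion computes tS -----

def MemoOK (pts : List (List Int)) (pi : List Int)
    (memo : PySem.Dict (Int × Int) Int) : Prop :=
  ∀ (i j : ℕ) (v : Int), memo.get? ((i : Int), (j : Int)) = some v → v = tS pts pi i j

theorem tailGo_spec (pts : List (List Int)) (pi : List Int) :
    ∀ (N i j : ℕ) (memo : PySem.Dict (Int × Int) Int),
      (pts.length - i) + (pi.length - j) ≤ N → i < pts.length → j < pi.length →
      MemoOK pts pi memo →
      (tailGo pi pts pts.length pi.length i j memo).1 = tS pts pi i j ∧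
        MemoOK pts pi (tailGo pi pts pts.length pi.length i j memo).2 := by
  intro N
  induction N with
  | zero => intro i j memo hN hi hj _; omega
  | succ N ih =>
    intro i j memo hN hi hj hmem
    rw [tailGo]
    cases hget : memo.get? ((i : Int), (j : Int)) with
    | some v =>
      exact ⟨hmem i j v hget, hmem⟩
    | none =>
      simp only []
      set p := (if _h : i + 1 < pts.length then
          let pb := tailGo pi pts pts.length pi.length (i + 1) j memo
          if _h2 : j + 1 < pi.length then
            let pr := tailGo pi pts pts.length pi.length i (j + 1) pb.2
            (max pb.1 pr.1, pr.2)
          else pb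
        else if _h : j + 1 < pi.length then tailGo pi pts pts.length pi.length i (j + 1) memo
        else ((0 : Int), memo)) with hp
      have hbranch : p.1 = (if i + 1 < pts.length then
            (if j + 1 < pi.length then max (tS pts pi (i+1) j) (tS pts pi i (j+1))
             else tS pts pi (i+1) j)
          else (if j + 1 < pi.length then tS pts pi i (j+1) else 0)) ∧
          MemoOK pts pi p.2 := by
        by_cases h1 : i + 1 < pts.length
        · obtain ⟨e1, m1⟩ := ih (i + 1) j memo (by omega) h1 hj hmem
          by_cases h2 : j + 1 < pi.length
          · obtain ⟨e2, m2⟩ := ih i (j + 1) _ (by omega) hi h2 m1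
            rw [hp]
            simp only [h1, h2, dif_pos, if_pos]
            exact ⟨by rw [e1, e2], m2⟩
          · rw [hp]
            simp only [h1, h2, dif_pos, dif_neg, not_false_iff, if_pos, if_neg]
            exact ⟨e1, m1⟩
        · by_cases h2 : j + 1 < pi.length
          · obtain ⟨e2, m2⟩ := ih i (j + 1) memo (by omega) hi h2 hmem
            rw [hp]
            simp only [h1, h2, dif_pos, dif_neg, not_false_iff, if_pos, if_neg]
            exact ⟨e2, m2⟩
          · rw [hp]
            simp only [h1, h2, dif_neg, not_false_iff, if_neg]
            exact ⟨trivial, hmem⟩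
      have hval : p.1 + PySem.List.pyGetD (PySem.List.pyGetD pts (i : Int) [])
          (PySem.List.pyGetD pi (j : Int) 0) 0 = tS pts pi i j := by
        rw [hbranch.1, tS_unfold pts pi i j]
        have hlook : PySem.List.pyGetD (PySem.List.pyGetD pts (i : Int) [])
            (PySem.List.pyGetD pi (j : Int) 0) 0 = pAt pts pi i j := by
          simp [pAt]
        rw [hlook]
      refine ⟨hval, ?_⟩
      intro i' j' v' hv'
      rw [PySem.Dict.get?_insert] at hv'
      by_cases heq : ((i' : Int), (j' : Int)) = ((i : Int), (j : Int))
      · rw [if_pos heq] at hv'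
        obtain ⟨hii, hjj⟩ := Prod.mk.injEq .. ▸ heq
        have hi' : i' = i := by exact_mod_cast hii
        have hj' : j' = j := by exact_mod_cast hjj
        subst hi'; subst hj'
        rw [← hval]
        exact (Option.some.injEq .. ▸ hv').symm
      · rw [if_neg heq] at hv'
        exact hbranch.2 i' j' v' hv'

theorem inner_fold (pts : List (List Int)) (pi : List Int) (i : ℕ) (hi : i < pts.length) :
    ∀ (js : List ℕ), (∀ j ∈ js, j < pi.length) →
      ∀ (l : List Int) (memo : PySem.Dict (Int × Int) Int), MemoOK pts pi memo →
      (js.foldl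
        (fun (acc2 : List Int × PySem.Dict (Int × Int) Int) j =>
          let p := tailGo pi pts pts.length pi.length i j acc2.2
          (acc2.1 ++ [p.1], p.2)) (l, memo)).1 = l ++ js.map (tS pts pi i) ∧
      MemoOK pts pi (js.foldl
        (fun (acc2 : List Int × PySem.Dict (Int × Int) Int) j =>
          let p := tailGo pi pts pts.length pi.length i j acc2.2
          (acc2.1 ++ [p.1], p.2)) (l, memo)).2 := by
  intro js
  induction js with
  | nil => intro _ l memo hmem; simpa using hmem
  | cons j js ihjs =>
    intro hjs l memo hmem
    have hj : j < pi.length := hjs j (List.mem_cons_self ..)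
    have hgo := tailGo_spec pts pi (pts.length + pi.length) i j memo (by omega) hi hj hmem
    simp only [List.foldl_cons]
    have := ihjs (fun j' hj' => hjs j' (List.mem_cons_of_mem _ hj'))
      (l ++ [(tailGo pi pts pts.length pi.length i j memo).1])
      (tailGo pi pts pts.length pi.length i j memo).2 hgo.2
    refine ⟨?_, this.2⟩
    rw [this.1, hgo.1]
    simp

theorem outer_fold (pts : List (List Int)) (pi : List Int) :
    ∀ (is : List ℕ), (∀ i ∈ is, i < pts.length) →
      ∀ (rows : List (List Int)) (memo : PySem.Dict (Int × Int) Int), MemoOK pts pi memo →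
      (is.foldl
        (fun (acc : List (List Int) × PySem.Dict (Int × Int) Int) i =>
          let r := (List.range pi.length).foldl
            (fun (acc2 : List Int × PySem.Dict (Int × Int) Int) j =>
              let p := tailGo pi pts pts.length pi.length i j acc2.2
              (acc2.1 ++ [p.1], p.2))
            (([] : List Int), acc.2)
          (acc.1 ++ [r.1], r.2)) (rows, memo)).1
        = rows ++ is.map (fun i => (List.range pi.length).map (tS pts pi i)) ∧
      MemoOK pts pi (is.foldl
        (fun (acc : List (List Int) × PySem.Dict (Int × Int) Int) i =>
          let r := (List.range pi.length).foldl
            (fun (acc2 : List Int × PySem.Dict (Int × Int) Int) j =>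
              let p := tailGo pi pts pts.length pi.length i j acc2.2
              (acc2.1 ++ [p.1], p.2))
            (([] : List Int), acc.2)
          (acc.1 ++ [r.1], r.2)) (rows, memo)).2 := by
  intro is
  induction is with
  | nil => intro _ rows memo hmem; simpa using hmem
  | cons i is ihis =>
    intro his rows memo hmem
    have hi : i < pts.length := his i (List.mem_cons_self ..)
    have hrow := inner_fold pts pi i hi (List.range pi.length)
      (fun j hj => List.mem_range.mp hj) [] memo hmem
    simp only [List.foldl_cons]
    have := ihis (fun i' hi' => his i' (List.mem_cons_of_mem _ hi'))
      (rows ++ [((List.range pi.length).foldl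
        (fun (acc2 : List Int × PySem.Dict (Int × Int) Int) j =>
          let p := tailGo pi pts pts.length pi.length i j acc2.2
          (acc2.1 ++ [p.1], p.2)) (([] : List Int), memo)).1])
      ((List.range pi.length).foldl
        (fun (acc2 : List Int × PySem.Dict (Int × Int) Int) j =>
          let p := tailGo pi pts pts.length pi.length i j acc2.2
          (acc2.1 ++ [p.1], p.2)) (([] : List Int), memo)).2 hrow.2
    refine ⟨?_, this.2⟩
    rw [this.1, hrow.1]
    simp

theorem B_eq (pts : List (List Int)) (pi : List Int) :
    compute_tail_alt pi pts = M pts.length pi.length (tS pts pi) := by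
  unfold compute_tail_alt
  have hmem0 : MemoOK pts pi PySem.Dict.empty := by
    intro i j v hv
    simp [PySem.Dict.get?_empty] at hv
  have := outer_fold pts pi (List.range pts.length)
    (fun i hi => List.mem_range.mp hi) [] PySem.Dict.empty hmem0
  rw [this.1]
  simp [M]

-- ----- A side: the four phases compute tS -----

theorem A_phase1 (pts : List (List Int)) (pi : List Int)
    (hm : 1 ≤ pts.length) (hn : 1 ≤ pi.length)
    (f : List (List Int) → Int → List (List Int))
    (hf : ∀ t i, f t i = setT t i (((pi.length - 1 : ℕ) : Int))
        (getT t (i + 1) (((pi.length - 1 : ℕ) : Int)) +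
          PySem.List.pyGetD (PySem.List.pyGetD pts i [])
            (PySem.List.pyGetD pi (((pi.length - 1 : ℕ) : Int)) 0) 0)) :
    ∀ (a : ℕ), a ≤ pts.length - 1 → ∀ (g : ℕ → ℕ → Int),
      (∀ i, a ≤ i → i < pts.length → g i (pi.length - 1) = tS pts pi i (pi.length - 1)) →
      (PySem.List.pyRange ((a : Int) - 1) (-1) (-1)).foldl f (M pts.length pi.length g)
      = M pts.length pi.length
          (fun i j => if j = pi.length - 1 then tS pts pi i (pi.length - 1) else g i j) := by
  intro a
  induction a with
  | zero =>
    intro _ g hg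
    rw [PySem.List.pyRange_neg_one_eq_nil (by omega)]
    simp only [List.foldl_nil]
    apply M_congr
    intro i hi j hj
    by_cases hje : j = pi.length - 1
    · subst hje; rw [if_pos rfl]; exact hg i (by omega) hi
    · rw [if_neg hje]
  | succ a ih =>
    intro ha g hg
    have hcast : ((a + 1 : ℕ) : Int) - 1 = (a : Int) := by push_cast; ring
    rw [hcast, PySem.List.pyRange_neg_one_cons (by omega), List.foldl_cons, hf]
    have hc1 : ((a : ℕ) : Int) + 1 = ((a + 1 : ℕ) : Int) := by push_cast; ring
    rw [hc1, getT_M g (a+1) (pi.length - 1) (by omega) (by omega)]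
    have hlook : PySem.List.pyGetD (PySem.List.pyGetD pts ((a:ℕ) : Int) [])
        (PySem.List.pyGetD pi (((pi.length - 1 : ℕ)) : Int) 0) 0
        = pAt pts pi a (pi.length - 1) := by
      simp [pAt]
    rw [hlook, hg (a+1) (by omega) (by omega)]
    have hval : tS pts pi (a+1) (pi.length - 1) + pAt pts pi a (pi.length - 1)
        = tS pts pi a (pi.length - 1) := by
      rw [tS_unfold pts pi a (pi.length - 1), if_pos (by omega : a + 1 < pts.length),
        if_neg (by omega : ¬ (pi.length - 1) + 1 < pi.length)]
    rw [hval, setT_M g a (pi.length - 1) _ (by omega) (by omega)]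
    rw [ih (by omega) _ (by
      intro i hi hilt
      by_cases hie : i = a
      · subst hie; rw [if_pos ⟨rfl, rfl⟩]
      · rw [if_neg (by tauto)]; exact hg i (by omega) hilt)]
    apply M_congr
    intro i hi j hj
    by_cases hje : j = pi.length - 1
    · subst hje; rw [if_pos rfl, if_pos rfl]
    · rw [if_neg hje, if_neg hje, if_neg (by tauto)]

theorem A_phase2 (pts : List (List Int)) (pi : List Int)
    (hm : 1 ≤ pts.length) (hn : 1 ≤ pi.length)
    (f : List (List Int) → Int → List (List Int))
    (hf : ∀ t j, f t j = setT t (((pts.length - 1 : ℕ) : Int)) j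
        (getT t (((pts.length - 1 : ℕ) : Int)) (j + 1) +
          PySem.List.pyGetD (PySem.List.pyGetD pts (((pts.length - 1 : ℕ) : Int)) [])
            (PySem.List.pyGetD pi j 0) 0)) :
    ∀ (a : ℕ), a ≤ pi.length - 1 → ∀ (g : ℕ → ℕ → Int),
      (∀ j, a ≤ j → j < pi.length → g (pts.length - 1) j = tS pts pi (pts.length - 1) j) →
      (PySem.List.pyRange ((a : Int) - 1) (-1) (-1)).foldl f (M pts.length pi.length g)
      = M pts.length pi.length
          (fun i j => if i = pts.length - 1 then tS pts pi (pts.length - 1) j else g i j) := by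
  intro a
  induction a with
  | zero =>
    intro _ g hg
    rw [PySem.List.pyRange_neg_one_eq_nil (by omega)]
    simp only [List.foldl_nil]
    apply M_congr
    intro i hi j hj
    by_cases hie : i = pts.length - 1
    · subst hie; rw [if_pos rfl]; exact hg j (by omega) hj
    · rw [if_neg hie]
  | succ a ih =>
    intro ha g hg
    have hcast : ((a + 1 : ℕ) : Int) - 1 = (a : Int) := by push_cast; ring
    rw [hcast, PySem.List.pyRange_neg_one_cons (by omega), List.foldl_cons, hf]
    have hc1 : ((a : ℕ) : Int) + 1 = ((a + 1 : ℕ) : Int) := by push_cast; ring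
    rw [hc1, getT_M g (pts.length - 1) (a+1) (by omega) (by omega)]
    have hlook : PySem.List.pyGetD (PySem.List.pyGetD pts (((pts.length - 1 : ℕ)) : Int) [])
        (PySem.List.pyGetD pi ((a:ℕ) : Int) 0) 0
        = pAt pts pi (pts.length - 1) a := by
      simp [pAt]
    rw [hlook, hg (a+1) (by omega) (by omega)]
    have hval : tS pts pi (pts.length - 1) (a+1) + pAt pts pi (pts.length - 1) a
        = tS pts pi (pts.length - 1) a := by
      rw [tS_unfold pts pi (pts.length - 1) a,
        if_neg (by omega : ¬ (pts.length - 1) + 1 < pts.length),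
        if_pos (by omega : a + 1 < pi.length)]
    rw [hval, setT_M g (pts.length - 1) a _ (by omega) (by omega)]
    rw [ih (by omega) _ (by
      intro j hj hjlt
      by_cases hje : j = a
      · subst hje; rw [if_pos ⟨rfl, rfl⟩]
      · rw [if_neg (by tauto)]; exact hg j (by omega) hjlt)]
    apply M_congr
    intro i hi j hj
    by_cases hie : i = pts.length - 1
    · subst hie; rw [if_pos rfl, if_pos rfl]
    · rw [if_neg hie, if_neg hie, if_neg (by tauto)]

theorem A_p3inner (pts : List (List Int)) (pi : List Int)
    (hm : 1 ≤ pts.length) (b : ℕ) (hb : b + 1 < pi.length)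
    (f : List (List Int) → Int → List (List Int))
    (hf : ∀ t i, f t i = setT t i ((b : ℕ) : Int)
        (max (getT t (i + 1) ((b : ℕ) : Int)) (getT t i (((b : ℕ) : Int) + 1)) +
          PySem.List.pyGetD (PySem.List.pyGetD pts i [])
            (PySem.List.pyGetD pi ((b : ℕ) : Int) 0) 0)) :
    ∀ (a : ℕ), a ≤ pts.length - 1 → ∀ (g : ℕ → ℕ → Int),
      (∀ i, a ≤ i → i < pts.length → g i b = tS pts pi i b) →
      (∀ i, i < pts.length → g i (b + 1) = tS pts pi i (b + 1)) →
      (PySem.List.pyRange ((a : Int) - 1) (-1) (-1)).foldl f (M pts.length pi.length g)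
      = M pts.length pi.length (fun i j => if j = b then tS pts pi i b else g i j) := by
  intro a
  induction a with
  | zero =>
    intro _ g hg _
    rw [PySem.List.pyRange_neg_one_eq_nil (by omega)]
    simp only [List.foldl_nil]
    apply M_congr
    intro i hi j hj
    by_cases hje : j = b
    · subst hje; rw [if_pos rfl]; exact hg i (by omega) hi
    · rw [if_neg hje]
  | succ a ih =>
    intro ha g hg hg2
    have hcast : ((a + 1 : ℕ) : Int) - 1 = (a : Int) := by push_cast; ring
    rw [hcast, PySem.List.pyRange_neg_one_cons (by omega), List.foldl_cons, hf]
    have hc1 : ((a : ℕ) : Int) + 1 = ((a + 1 : ℕ) : Int) := by push_cast; ring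
    have hc2 : ((b : ℕ) : Int) + 1 = ((b + 1 : ℕ) : Int) := by push_cast; ring
    rw [hc1, hc2, getT_M g (a+1) b (by omega) (by omega),
      getT_M g a (b+1) (by omega) (by omega)]
    have hlook : PySem.List.pyGetD (PySem.List.pyGetD pts ((a:ℕ) : Int) [])
        (PySem.List.pyGetD pi ((b:ℕ) : Int) 0) 0 = pAt pts pi a b := by
      simp [pAt]
    rw [hlook, hg (a+1) (by omega) (by omega), hg2 a (by omega)]
    have hval : max (tS pts pi (a+1) b) (tS pts pi a (b+1)) + pAt pts pi a b
        = tS pts pi a b := by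
      rw [tS_unfold pts pi a b, if_pos (by omega : a + 1 < pts.length),
        if_pos (by omega : b + 1 < pi.length)]
    rw [hval, setT_M g a b _ (by omega) (by omega)]
    rw [ih (by omega) _ (by
        intro i hi hilt
        by_cases hie : i = a
        · subst hie; rw [if_pos ⟨rfl, rfl⟩]
        · rw [if_neg (by tauto)]; exact hg i (by omega) hilt)
      (by
        intro i hilt
        rw [if_neg (by omega : ¬ (i = a ∧ b + 1 = b))]
        exact hg2 i hilt)]
    apply M_congr
    intro i hi j hj
    by_cases hje : j = b
    · subst hje; rw [if_pos rfl, if_pos rfl]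
    · rw [if_neg hje, if_neg hje, if_neg (by tauto)]

theorem A_phase3 (pts : List (List Int)) (pi : List Int)
    (hm : 1 ≤ pts.length) (hn : 1 ≤ pi.length)
    (G : List (List Int) → Int → List (List Int))
    (hG : ∀ t j, G t j = (PySem.List.pyRange (((pts.length - 1 : ℕ) : Int) - 1) (-1) (-1)).foldl
        (fun t i => setT t i j
          (max (getT t (i + 1) j) (getT t i (j + 1)) +
            PySem.List.pyGetD (PySem.List.pyGetD pts i [])
              (PySem.List.pyGetD pi j 0) 0)) t) :
    ∀ (b : ℕ), b ≤ pi.length - 1 → ∀ (g : ℕ → ℕ → Int),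
      (∀ i, i < pts.length → ∀ j, b ≤ j → j < pi.length → g i j = tS pts pi i j) →
      (∀ j, j < pi.length → g (pts.length - 1) j = tS pts pi (pts.length - 1) j) →
      (PySem.List.pyRange ((b : Int) - 1) (-1) (-1)).foldl G (M pts.length pi.length g)
      = M pts.length pi.length (tS pts pi) := by
  intro b
  induction b with
  | zero =>
    intro _ g hcol _
    rw [PySem.List.pyRange_neg_one_eq_nil (by omega)]
    simp only [List.foldl_nil]
    exact M_congr (fun i hi j hj => hcol i hi j (by omega) hj)
  | succ b ih =>
    intro hble g hcol hrow
    have hcast : ((b + 1 : ℕ) : Int) - 1 = (b : Int) := by push_cast; ring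
    rw [hcast, PySem.List.pyRange_neg_one_cons (by omega), List.foldl_cons, hG]
    rw [A_p3inner pts pi hm b (by omega) _ (fun t i => rfl) (pts.length - 1) le_rfl g
      (by intro i hi hilt
          have : i = pts.length - 1 := by omega
          subst this
          exact hrow b (by omega))
      (by intro i hilt; exact hcol i hilt (b+1) le_rfl (by omega))]
    rw [ih (by omega) _
      (by intro i hilt j hbj hjlt
          by_cases hje : j = b
          · subst hje; rw [if_pos rfl]
          · rw [if_neg hje]; exact hcol i hilt j (by omega) hjlt)
      (by intro j hjlt
          by_cases hje : j = b
          · subst hje; rw [if_pos rfl]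
          · rw [if_neg hje]; exact hrow j hjlt)]

theorem A_eq (pts : List (List Int)) (pi : List Int)
    (hm : 1 ≤ pts.length) (hn : 1 ≤ pi.length) :
    compute_tail pi pts = M pts.length pi.length (tS pts pi) := by
  unfold compute_tail
  simp only [PySem.List.len_eq]
  rw [show ((pts.length : Int)) - 2 = ((pts.length - 1 : ℕ) : Int) - 1 from by omega,
    show ((pi.length : Int)) - 2 = ((pi.length - 1 : ℕ) : Int) - 1 from by omega,
    show ((pts.length : Int)) - 1 = ((pts.length - 1 : ℕ) : Int) from by omega,
    show ((pi.length : Int)) - 1 = ((pi.length - 1 : ℕ) : Int) from by omega]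
  have htail0 : (PySem.List.pyRange 0 (pts.length : Int) 1).map
      (fun _ => List.replicate ((pi.length : Int)).toNat (0 : Int))
      = M pts.length pi.length (fun _ _ => (0 : Int)) := by
    rw [PySem.List.pyRange_one]
    simp only [Int.sub_zero, Int.toNat_natCast, List.map_map, M]
    apply List.map_congr_left
    intro i _
    apply List.ext_getElem
    · simp
    · intro k h1 h2
      simp
  rw [htail0]
  have hv : PySem.List.pyGetD (PySem.List.pyGetD pts (((pts.length - 1 : ℕ)) : Int) [])
      (PySem.List.pyGetD pi (((pi.length - 1 : ℕ)) : Int) 0) 0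
      = pAt pts pi (pts.length - 1) (pi.length - 1) := by
    simp [pAt]
  rw [hv, setT_M (fun _ _ => (0:Int)) (pts.length - 1) (pi.length - 1) _ (by omega) (by omega)]
  rw [A_phase1 pts pi hm hn _ (fun t i => rfl) (pts.length - 1) le_rfl _
    (by intro i hi hilt
        have : i = pts.length - 1 := by omega
        subst this
        rw [if_pos ⟨rfl, rfl⟩, tS_unfold pts pi (pts.length - 1) (pi.length - 1),
          if_neg (by omega : ¬ (pts.length - 1) + 1 < pts.length),
          if_neg (by omega : ¬ (pi.length - 1) + 1 < pi.length), zero_add])]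
  rw [A_phase2 pts pi hm hn _ (fun t j => rfl) (pi.length - 1) le_rfl _
    (by intro j hj hjlt
        have : j = pi.length - 1 := by omega
        subst this
        rw [if_pos rfl])]
  rw [A_phase3 pts pi hm hn _ (fun t j => rfl) (pi.length - 1) le_rfl _
    (by intro i hilt j hbj hjlt
        have : j = pi.length - 1 := by omega
        subst this
        by_cases hie : i = pts.length - 1
        · subst hie; rw [if_pos rfl]
        · rw [if_neg hie, if_pos rfl])
    (by intro j hjlt
        rw [if_pos rfl])]

-- ===== VERDICT (by name: the statement is the Claim_ definition above) =====
theorem compute_tail_spec : Claim_equal_compute_tail := by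
  intro pi pts _ hpre
  unfold Spec_compute_tail
  obtain ⟨h1, h2, -⟩ := hpre
  have hn : 1 ≤ pi.length := List.length_pos_iff.mpr h1
  have hm : 1 ≤ pts.length := List.length_pos_iff.mpr h2
  rw [A_eq pts pi hm hn, B_eq pts pi]
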